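-- pv_equiv track=rewrite | github.com/tomdh-git/BMI-Calculator | PythonProblems.py | get_similars
-- ===== SOURCE A (Python) =====
-- def get_similars(s1: str, s2: str, s3: str) -> str:
--     """finds a letter or letters
--     in the string that all
--     three strings have in common
--
--     Args:
--         s1 (str): first string
--         s2 (str): second string
--         s3 (str): third string
--
--     Returns:
--         str: returns the letters that they have in common
--     """
--     list = []
--     for i in s1:
--         for j in s2:
--             for k in s3:
--                 if i == j and j == k and i == k:
--                     list.append(i)
--     return ''.join(list)
-- ===== SOURCE B (Python) =====
-- def get_similars(s1: str, s2: str, s3: str) -> str: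
--     """One pass: count chars of s2 and s3 once; each char of s1 contributes
--     count2(c)*count3(c) copies (same multiset semantics as the triple loop)."""
--     c2 = {}
--     for ch in s2:
--         c2[ch] = c2.get(ch, 0) + 1
--     c3 = {}
--     for ch in s3:
--         c3[ch] = c3.get(ch, 0) + 1
--     return ''.join(ch * (c2.get(ch, 0) * c3.get(ch, 0)) for ch in s1)
-- ===== Notes on version B (the rewrite author's own statement) =====
-- stated objective: faster
-- what changed: Replaces the triple nested scan with two hash-count passes over s2 and s3 plus one pass over s1 emitting count2(c)*count3(c) copies of each character.
import Mathlib
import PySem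

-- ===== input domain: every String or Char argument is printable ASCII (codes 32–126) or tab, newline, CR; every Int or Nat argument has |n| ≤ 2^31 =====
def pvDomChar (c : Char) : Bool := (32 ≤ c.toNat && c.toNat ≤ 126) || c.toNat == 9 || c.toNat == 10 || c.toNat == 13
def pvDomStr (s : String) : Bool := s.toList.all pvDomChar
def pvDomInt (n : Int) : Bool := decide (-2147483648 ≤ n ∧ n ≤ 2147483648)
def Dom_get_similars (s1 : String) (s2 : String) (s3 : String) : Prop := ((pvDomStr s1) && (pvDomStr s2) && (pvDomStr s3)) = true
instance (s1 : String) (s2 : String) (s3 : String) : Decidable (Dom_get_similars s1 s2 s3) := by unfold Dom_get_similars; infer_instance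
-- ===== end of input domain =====

-- B replaces A's triple nested scan with two counting passes (dicts over s2, s3)
-- and one pass over s1 emitting count2(c)*count3(c) copies of each character.


-- ===== PORT A =====
-- triple nested for-loops appending i whenever i == j == k
def get_similars (s1 : String) (s2 : String) (s3 : String) : String :=
  String.mk
    (s1.toList.foldl (fun acc i =>
      s2.toList.foldl (fun acc j =>
        s3.toList.foldl (fun acc k =>
          if i = j ∧ j = k ∧ i = k then acc ++ [i] else acc) acc) acc) [])

-- ===== PORT B =====
-- two counting dicts (c[ch] = c.get(ch,0)+1), then one pass over s1 with ch * (n2*n3)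
def get_similars_alt (s1 : String) (s2 : String) (s3 : String) : String :=
  let c2 : PySem.Dict Char Int :=
    s2.toList.foldl (fun d ch => d.insert ch (d.getD ch 0 + 1)) PySem.Dict.empty
  let c3 : PySem.Dict Char Int :=
    s3.toList.foldl (fun d ch => d.insert ch (d.getD ch 0 + 1)) PySem.Dict.empty
  String.mk
    (s1.toList.flatMap (fun ch =>
      List.replicate ((c2.getD ch 0 * c3.getD ch 0).toNat) ch))

-- ===== PRECONDITION & SPEC =====
def Spec_get_similars (s1 : String) (s2 : String) (s3 : String) (out : String) : Prop := out = get_similars_alt s1 s2 s3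
instance (s1 : String) (s2 : String) (s3 : String) (out : String) : Decidable (Spec_get_similars s1 s2 s3 out) := by unfold Spec_get_similars; infer_instance

-- ===== CLAIM (what is proved, stated in full; the proofs are below) =====
def Claim_equal_get_similars : Prop := ∀ (s1 : String) (s2 : String) (s3 : String), Dom_get_similars s1 s2 s3 → Spec_get_similars s1 s2 s3 (get_similars s1 s2 s3)

-- ===== LEMMAS AND PROOFS =====

-- innermost loop: adds (count of i in l) copies of i when i = j, nothing otherwise
theorem pv_inner (i j : Char) (l : List Char) (acc : List Char) :
    l.foldl (fun acc k => if i = j ∧ j = k ∧ i = k then acc ++ [i] else acc) acc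
      = acc ++ List.replicate (if i = j then l.count i else 0) i := by
  induction l generalizing acc with
  | nil => simp
  | cons k l ih =>
    simp only [List.foldl_cons, ih, List.count_cons]
    by_cases hij : i = j
    · subst hij
      by_cases hk : i = k
      · subst hk
        simp [List.append_assoc, List.replicate_succ]
      · simp [hk, Ne.symm hk]
    · simp [hij]

-- middle loop: adds (count of i in l) * c copies of i
theorem pv_mid (i : Char) (c : Nat) (l : List Char) (acc : List Char) :
    l.foldl (fun acc j => acc ++ List.replicate (if i = j then c else 0) i) acc
      = acc ++ List.replicate (l.count i * c) i := by
  induction l generalizing acc with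
  | nil => simp
  | cons j l ih =>
    simp only [List.foldl_cons, ih, List.count_cons]
    by_cases hij : i = j
    · subst hij
      simp only [List.append_assoc]
      rw [← List.replicate_add]
      congr 2
      simp
      ring
    · simp [hij, Ne.symm hij]

-- counting dict reads back as List.count
theorem pv_counter (l : List Char) (v : Char) :
    ((l.foldl (fun d ch => d.insert ch (d.getD ch 0 + 1)) PySem.Dict.empty).getD v 0)
      = (l.count v : Int) := by
  rw [PySem.Dict.getD_foldl_insert_add_one]
  simp

theorem pv_char_lists (s1 s2 s3 : String) :
    (get_similars s1 s2 s3) = get_similars_alt s1 s2 s3 := by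
  unfold get_similars get_similars_alt
  simp only [pv_counter]
  have hmul : ∀ ch : Char,
      (((s2.toList.count ch : Int)) * ((s3.toList.count ch : Int))).toNat
        = s2.toList.count ch * s3.toList.count ch := by
    intro ch; exact_mod_cast Int.toNat_natCast _
  congr 1
  have hcong : s1.toList.foldl (fun acc i =>
      s2.toList.foldl (fun acc j =>
        s3.toList.foldl (fun acc k =>
          if i = j ∧ j = k ∧ i = k then acc ++ [i] else acc) acc) acc) []
    = s1.toList.foldl (fun acc i =>
        acc ++ List.replicate
          (((s2.toList.count i : Int) * (s3.toList.count i : Int)).toNat) i) [] := by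
    refine PySem.List.foldl_congr_mem _ _ _ _ ?_
    intro acc i _hi
    simp only [pv_inner, pv_mid, hmul]
  rw [hcong, PySem.List.foldl_append_eq_flatMap]
  simp

-- ===== VERDICT (by name: the statement is the Claim_ definition above) =====
theorem get_similars_spec : Claim_equal_get_similars := by
  intro s1 s2 s3 _
  exact pv_char_lists s1 s2 s3
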